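-- pv_equiv track=rewrite | github.com/samcao1124/Intro_CS_1114 | lab_05/get_fused_sequence_complement.py | get_fused_sequence_complement
-- ===== SOURCE A (Python) =====
-- def get_fused_sequence_complement(sequence_a, sequence_b):
--     fused_sequence = str()
--     min_num = min(len(sequence_a), len(sequence_b))
--     for i in range(min_num):
--         fused_sequence = fused_sequence + sequence_a[i] + sequence_b[i]
--     fused_sequence = fused_sequence + sequence_a[min_num:]
--     if min_num == sequence_b:
--         fused_sequence = fused_sequence + sequence_b[min_num]
--     fused_sequence_new = str()
--     for i in fused_sequence:
--         fused_sequence_new = fused_sequence_new + get_complement(i)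
--     return fused_sequence_new
--
-- def get_complement(nucleotide):
--     if nucleotide == 'A':
--         return 'T'
--     elif nucleotide == 'C':
--         return 'G'
--     elif nucleotide == 'T':
--         return 'A'
--     elif nucleotide == 'G':
--         return 'C'
--     else:
--         return ' '
-- ===== SOURCE B (Python) =====
-- def get_complement(nucleotide):
--     if nucleotide == 'A':
--         return 'T'
--     elif nucleotide == 'C':
--         return 'G'
--     elif nucleotide == 'T':
--         return 'A'
--     elif nucleotide == 'G':
--         return 'C'
--     else:
--         return ' '
--
--
-- def get_fused_sequence_complement(sequence_a, sequence_b):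
--     ca = [get_complement(c) for c in sequence_a]
--     cb = [get_complement(c) for c in sequence_b]
--     return ''.join(x + y for x, y in zip(ca, cb)) + ''.join(ca[len(cb):])
-- ===== Notes on version B (the rewrite author's own statement) =====
-- stated objective: faster
-- what changed: B complements each sequence once up front and weaves the complemented characters with zip plus a joined tail slice, instead of A's interleave-by-index loop with repeated string concatenation followed by a second concatenating complement pass (A's dead int==str branch is dropped).
import Mathlib
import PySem

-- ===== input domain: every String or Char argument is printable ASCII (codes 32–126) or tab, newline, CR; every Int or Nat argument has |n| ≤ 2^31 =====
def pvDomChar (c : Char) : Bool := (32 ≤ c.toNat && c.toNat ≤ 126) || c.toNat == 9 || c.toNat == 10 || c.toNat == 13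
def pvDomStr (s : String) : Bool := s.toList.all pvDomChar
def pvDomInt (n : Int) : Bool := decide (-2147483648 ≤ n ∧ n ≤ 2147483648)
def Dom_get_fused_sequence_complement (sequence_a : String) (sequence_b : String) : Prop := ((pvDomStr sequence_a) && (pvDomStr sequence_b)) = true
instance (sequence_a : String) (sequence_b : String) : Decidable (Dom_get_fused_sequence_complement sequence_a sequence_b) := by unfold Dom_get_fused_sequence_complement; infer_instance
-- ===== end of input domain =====

-- B complements each input once and weaves with zip instead of A's interleave-then-complement
-- index loop with quadratic string concatenation (objective: faster, measured; same return value everywhere).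

-- ===== PORT A =====
-- helper get_complement, shared by both ports (B keeps it unchanged)
def get_complement (nucleotide : Char) : Char :=
  if nucleotide = 'A' then 'T'
  else if nucleotide = 'C' then 'G'
  else if nucleotide = 'T' then 'A'
  else if nucleotide = 'G' then 'C'
  else ' '

def get_fused_sequence_complement (sequence_a : String) (sequence_b : String) : String :=
  let la := sequence_a.toList
  let lb := sequence_b.toList
  let min_num := min la.length lb.length
  -- for i in range(min_num): fused = fused + a[i] + b[i]
  let fused := (List.range min_num).foldl
    (fun acc i => acc ++ [la.getD i ' ', lb.getD i ' ']) []
  -- fused = fused + sequence_a[min_num:]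
  let fused := fused ++ PySem.List.slice la (some (min_num : Int)) none
  -- Python's 'if min_num == sequence_b' compares an int with a str: always False, branch is dead
  -- for i in fused: fused_new = fused_new + get_complement(i)
  let fused_new := fused.foldl (fun acc c => acc ++ [get_complement c]) []
  String.mk fused_new

-- ===== PORT B =====
def get_fused_sequence_complement_alt (sequence_a : String) (sequence_b : String) : String :=
  let ca := sequence_a.toList.map get_complement
  let cb := sequence_b.toList.map get_complement
  String.mk ((List.zipWith (fun x y => [x, y]) ca cb).flatten ++ ca.drop cb.length)

-- ===== PRECONDITION & SPEC =====
def Spec_get_fused_sequence_complement (sequence_a : String) (sequence_b : String) (out : String) : Prop := out = get_fused_sequence_complement_alt sequence_a sequence_b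
instance (sequence_a : String) (sequence_b : String) (out : String) : Decidable (Spec_get_fused_sequence_complement sequence_a sequence_b out) := by unfold Spec_get_fused_sequence_complement; infer_instance

-- ===== CLAIM (what is proved, stated in full; the proofs are below) =====
def Claim_equal_get_fused_sequence_complement : Prop := ∀ (sequence_a : String) (sequence_b : String), Dom_get_fused_sequence_complement sequence_a sequence_b → Spec_get_fused_sequence_complement sequence_a sequence_b (get_fused_sequence_complement sequence_a sequence_b)

-- ===== LEMMAS AND PROOFS =====

-- A's index loop over range(min |la| |lb|) builds exactly the head-to-head interleaving of la and lb
lemma range_interleave (la lb : List Char) :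
    (List.range (min la.length lb.length)).flatMap
      (fun i => [la.getD i ' ', lb.getD i ' ']) =
    (List.zipWith (fun x y => [x, y]) la lb).flatten := by
  induction la generalizing lb with
  | nil => simp
  | cons a la ih =>
    cases lb with
    | nil => simp
    | cons b lb =>
      simp only [List.length_cons, Nat.succ_min_succ]
      rw [List.range_succ_eq_map]
      simp only [List.flatMap_cons, List.flatMap_map, List.getD_cons_zero, List.getD_cons_succ,
        List.zipWith_cons_cons, List.flatten_cons]
      simpa using ih lb

-- dropping at min |la| |lb| coincides with dropping at |lb|
lemma drop_min_eq (la lb : List Char) :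
    la.drop (min la.length lb.length) = la.drop lb.length := by
  rcases Nat.le_total lb.length la.length with h | h
  · rw [Nat.min_eq_right h]
  · rw [Nat.min_eq_left h, List.drop_length, List.drop_eq_nil_of_le h]

-- ===== VERDICT (by name: the statement is the Claim_ definition above) =====
theorem get_fused_sequence_complement_spec : Claim_equal_get_fused_sequence_complement := by
  intro sa sb _
  unfold Spec_get_fused_sequence_complement get_fused_sequence_complement
    get_fused_sequence_complement_alt
  simp only [PySem.List.foldl_append_singleton_eq_map]
  simp only [PySem.List.foldl_append_eq_flatMap,
    PySem.List.slice_from_natCast, List.nil_append, range_interleave]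
  rw [drop_min_eq]
  simp [List.map_flatten, List.map_zipWith, List.zipWith_map, List.map_drop]
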